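-- pv_equiv track=rewrite | github.com/krup18/image_caption | preprocessing.py | clean_captions
-- ===== SOURCE A (Python) =====
-- import string
--
-- def clean_captions(original_caption):
--     translated = str.maketrans('', '', string.punctuation)
--     caption_wo_punctuation = original_caption.translate(translated)
--
--     words_not_single_character = ""
--     for word in caption_wo_punctuation.split():
--         if len(word) > 1:
--             words_not_single_character += " " + word
--
--     words_not_numeric = ""
--     for word in words_not_single_character.split():
--         alpha = word.isalpha()
--         if alpha:
--             words_not_numeric += " " + word
--
--     return(words_not_numeric)
-- ===== SOURCE B (Python) =====
-- import string
--
-- def clean_captions(original_caption):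
--     words = original_caption.translate(str.maketrans('', '', string.punctuation)).split()
--     return ''.join(' ' + w for w in words if len(w) > 1 and w.isalpha())
-- ===== Notes on version B (the rewrite author's own statement) =====
-- stated objective: simpler
-- what changed: Single split and single filtering pass with a join, instead of A's two build-a-string-then-resplit accumulation loops.
import Mathlib
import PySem

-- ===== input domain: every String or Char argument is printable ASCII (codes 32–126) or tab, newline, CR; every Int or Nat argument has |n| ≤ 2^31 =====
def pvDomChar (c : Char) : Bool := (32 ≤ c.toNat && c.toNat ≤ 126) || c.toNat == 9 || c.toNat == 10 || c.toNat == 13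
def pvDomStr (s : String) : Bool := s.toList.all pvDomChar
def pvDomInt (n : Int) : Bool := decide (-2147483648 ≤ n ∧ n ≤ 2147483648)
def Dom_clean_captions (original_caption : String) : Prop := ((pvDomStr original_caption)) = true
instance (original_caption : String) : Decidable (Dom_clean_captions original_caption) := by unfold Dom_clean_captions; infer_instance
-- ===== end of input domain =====

-- B replaces A's two build-a-string-then-resplit loops by one split, one filter and a join (objective: simpler).

-- ===== PORT A =====
-- string.punctuation
def pvPunct : List Char := "!\"#$%&'()*+,-./:;<=>?@[\\]^_`{|}~".toList

-- 'original_caption.translate(str.maketrans('', '', string.punctuation))' deletes the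
-- punctuation characters: ported as a character filter (exact; the table only deletes).
def clean_captions (original_caption : String) : String :=
  let caption_wo_punctuation :=
    original_caption.toList.filter (fun c => !pvPunct.contains c)
  let words_not_single_character :=
    (PySem.Chars.split₀ caption_wo_punctuation).foldl
      (fun acc word => if 1 < word.length then acc ++ (' ' :: word) else acc) []
  let words_not_numeric :=
    (PySem.Chars.split₀ words_not_single_character).foldl
      (fun acc word => if PySem.Chars.strIsalpha word then acc ++ (' ' :: word) else acc) []
  String.ofList words_not_numeric

-- ===== PORT B =====
def clean_captions_alt (original_caption : String) : String :=
  let words :=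
    PySem.Chars.split₀ (original_caption.toList.filter (fun c => !pvPunct.contains c))
  String.ofList
    (((words.filter (fun w => decide (1 < w.length) && PySem.Chars.strIsalpha w)).map
        (fun w => ' ' :: w)).flatten)

-- ===== PRECONDITION & SPEC =====
def Spec_clean_captions (original_caption : String) (out : String) : Prop := out = clean_captions_alt original_caption
instance (original_caption : String) (out : String) : Decidable (Spec_clean_captions original_caption out) := by unfold Spec_clean_captions; infer_instance

-- ===== CLAIM (what is proved, stated in full; the proofs are below) =====
def Claim_equal_clean_captions : Prop := ∀ (original_caption : String), Dom_clean_captions original_caption → Spec_clean_captions original_caption (clean_captions original_caption)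

-- ===== LEMMAS AND PROOFS =====

-- a "good" word: nonempty and free of whitespace characters
def pvGood (w : List Char) : Prop := w ≠ [] ∧ ∀ c ∈ w, PySem.Chars.isspace c = false

-- one-step unfoldings of split₀'s worker
theorem pvGo_char (c : Char) (s cur : List Char) (acc : List (List Char))
    (hc : PySem.Chars.isspace c = false) :
    PySem.Chars.split₀.go (c :: s) cur acc = PySem.Chars.split₀.go s (c :: cur) acc := by
  conv_lhs => unfold PySem.Chars.split₀.go
  simp [hc]

theorem pvGo_space_nil (c : Char) (s : List Char) (acc : List (List Char))
    (hc : PySem.Chars.isspace c = true) :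
    PySem.Chars.split₀.go (c :: s) [] acc = PySem.Chars.split₀.go s [] acc := by
  conv_lhs => unfold PySem.Chars.split₀.go
  simp [hc]

theorem pvGo_space_cons (c d : Char) (s cur : List Char) (acc : List (List Char))
    (hc : PySem.Chars.isspace c = true) :
    PySem.Chars.split₀.go (c :: s) (d :: cur) acc
      = PySem.Chars.split₀.go s [] ((d :: cur).reverse :: acc) := by
  conv_lhs => unfold PySem.Chars.split₀.go
  simp [hc]

theorem pvGo_nil_cons (d : Char) (cur : List Char) (acc : List (List Char)) :
    PySem.Chars.split₀.go [] (d :: cur) acc = (((d :: cur).reverse) :: acc).reverse := by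
  conv_lhs => unfold PySem.Chars.split₀.go
  simp

theorem pvGo_nil_nil (acc : List (List Char)) :
    PySem.Chars.split₀.go [] [] acc = acc.reverse := by
  conv_lhs => unfold PySem.Chars.split₀.go
  simp

-- every word produced by split₀ is good
theorem pvGood_go (s : List Char) (cur : List Char) (acc : List (List Char))
    (hcur : ∀ c ∈ cur, PySem.Chars.isspace c = false)
    (hacc : ∀ w ∈ acc, pvGood w) :
    ∀ w ∈ PySem.Chars.split₀.go s cur acc, pvGood w := by
  induction s generalizing cur acc with
  | nil =>
    intro w hw
    cases cur with
    | nil => rw [pvGo_nil_nil] at hw; exact hacc w (List.mem_reverse.mp hw)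
    | cons d cur' =>
      rw [pvGo_nil_cons] at hw
      rcases List.mem_cons.mp (List.mem_reverse.mp hw) with h | h
      · subst h
        exact ⟨by simp, fun c hc => hcur c (List.mem_reverse.mp hc)⟩
      · exact hacc w h
  | cons c rest ih =>
    intro w hw
    by_cases hc : PySem.Chars.isspace c = true
    · cases cur with
      | nil => rw [pvGo_space_nil _ _ _ hc] at hw; exact ih [] acc (by simp) hacc w hw
      | cons d cur' =>
        rw [pvGo_space_cons _ _ _ _ _ hc] at hw
        refine ih [] _ (by simp) ?_ w hw
        intro v hv
        rcases List.mem_cons.mp hv with h | h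
        · subst h
          exact ⟨by simp, fun e he => hcur e (List.mem_reverse.mp he)⟩
        · exact hacc v h
    · rw [pvGo_char _ _ _ _ (by simpa using hc)] at hw
      refine ih (c :: cur) acc ?_ hacc w hw
      intro d hd
      rcases List.mem_cons.mp hd with h | h
      · subst h; simpa using hc
      · exact hcur d h

theorem pvGood_split₀ (s : List Char) : ∀ w ∈ PySem.Chars.split₀ s, pvGood w := by
  unfold PySem.Chars.split₀
  exact pvGood_go s [] [] (by simp) (by simp)

-- go over a run of non-space characters just accumulates them
theorem pvGo_nonspace (w s : List Char) (cur : List Char) (acc : List (List Char))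
    (hw : ∀ c ∈ w, PySem.Chars.isspace c = false) :
    PySem.Chars.split₀.go (w ++ s) cur acc = PySem.Chars.split₀.go s (w.reverse ++ cur) acc := by
  induction w generalizing cur with
  | nil => simp
  | cons c t ih =>
    rw [List.cons_append, pvGo_char _ _ _ _ (hw c (by simp)),
      ih (c :: cur) (fun d hd => hw d (by simp [hd]))]
    simp

-- splitting the flattened " w₁ w₂ …" recovers the good words, flushing the pending word first
theorem pvGo_flatten (ws : List (List Char)) (cur : List Char) (acc : List (List Char))
    (hws : ∀ w ∈ ws, pvGood w) (hcur : cur ≠ []) :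
    PySem.Chars.split₀.go ((ws.map (fun w => ' ' :: w)).flatten) cur acc
      = (cur.reverse :: acc).reverse ++ ws := by
  obtain ⟨d, cur', rfl⟩ := List.exists_cons_of_ne_nil hcur
  induction ws generalizing d cur' acc with
  | nil => simp [pvGo_nil_cons]
  | cons w t ih =>
    have hw : pvGood w := hws w (by simp)
    obtain ⟨e, w', rfl⟩ := List.exists_cons_of_ne_nil hw.1
    simp only [List.map_cons, List.flatten_cons, List.cons_append]
    rw [pvGo_space_cons _ _ _ _ _ (by decide), pvGo_char _ _ _ _ (hw.2 e (by simp)),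
      pvGo_nonspace w' _ [e] _ (fun c hc => hw.2 c (by simp [hc]))]
    have : w'.reverse ++ [e] = (e :: w').reverse ++ [] := by simp
    rw [this]
    obtain ⟨f, v, hv⟩ : ∃ f v, (e :: w').reverse ++ ([] : List Char) = f :: v := by
      rcases h : (e :: w').reverse with _ | ⟨f, v⟩
      · exact absurd h (by simp)
      · exact ⟨f, v, by simp⟩
    rw [hv, ih ((d :: cur').reverse :: acc) (fun u hu => hws u (List.mem_cons_of_mem _ hu)) f v
      (by simp), ← hv]
    simp

theorem pvSplit₀_flatten (ws : List (List Char)) (hws : ∀ w ∈ ws, pvGood w) :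
    PySem.Chars.split₀ ((ws.map (fun w => ' ' :: w)).flatten) = ws := by
  cases ws with
  | nil => rfl
  | cons w t =>
    have hw : pvGood w := hws w (by simp)
    obtain ⟨e, w', rfl⟩ := List.exists_cons_of_ne_nil hw.1
    unfold PySem.Chars.split₀
    simp only [List.map_cons, List.flatten_cons, List.cons_append]
    rw [pvGo_space_nil _ _ _ (by decide), pvGo_char _ _ _ _ (hw.2 e (by simp)),
      pvGo_nonspace w' _ [e] _ (fun c hc => hw.2 c (by simp [hc]))]
    rw [pvGo_flatten t _ [] (fun u hu => hws u (by simp [hu])) (by simp)]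
    simp

-- A's accumulation loop is "filter then flatten the space-prefixed words"
theorem pvFoldl_keep (p : List Char → Prop) [DecidablePred p] (l : List (List Char)) :
    l.foldl (fun acc w => if p w then acc ++ (' ' :: w) else acc) []
      = ((l.filter (fun w => decide (p w))).map (fun w => ' ' :: w)).flatten := by
  have h : ∀ acc, l.foldl (fun acc w => if p w then acc ++ (' ' :: w) else acc) acc
      = acc ++ ((l.filter (fun w => decide (p w))).map (fun w => ' ' :: w)).flatten := by
    induction l with
    | nil => simp
    | cons w t ih =>
      intro acc
      by_cases hp : p w
      · simp [hp, ih]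
      · simp [hp, ih]
  simpa using h []

-- ===== VERDICT (by name: the statement is the Claim_ definition above) =====
theorem clean_captions_spec : Claim_equal_clean_captions := by
  intro s _
  show clean_captions s = clean_captions_alt s
  simp only [clean_captions, clean_captions_alt]
  rw [pvFoldl_keep (fun w => 1 < w.length),
    pvFoldl_keep (fun w => PySem.Chars.strIsalpha w = true),
    pvSplit₀_flatten _ (fun w hw => pvGood_split₀ _ w (List.mem_filter.mp hw).1),
    List.filter_filter]
  simp only [Bool.decide_eq_true, Bool.and_comm]
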